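-- pv_equiv track=rewrite | github.com/Zhouhaoran1994/cs61a_summer_2023 | lecture_17/pratice.py | read_trees
-- ===== SOURCE A (Python) =====
-- def read_trees(lines): # more than one tree
--     trees = []
--     tokens = []
--     for line in lines:
--         if line.strip():
--             tokens.extend(line.replace("(", " ( ").replace(")", " ) ").split())
--             if tokens.count("(") == tokens.count(")"):
--                 trees.append(tokens)
--                 tokens = []
--     return trees
-- ===== SOURCE B (Python) =====
-- def read_trees(lines):
--     # Staged/declarative version: tokenize nonblank lines, take prefix sums of
--     # each line's paren delta, cut wherever the global prefix sum is zero, then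
--     # build each tree by flattening a slice.  No token buffer is maintained.
--     toklists = [line.replace("(", " ( ").replace(")", " ) ").split()
--                 for line in lines if line.strip()]
--     deltas = [ts.count("(") - ts.count(")") for ts in toklists]
--     sums = []
--     s = 0
--     for d in deltas:
--         s += d
--         sums.append(s)
--     cuts = [i + 1 for i in range(len(toklists)) if sums[i] == 0]
--     trees = []
--     prev = 0
--     for c in cuts:
--         trees.append([t for ts in toklists[prev:c] for t in ts])
--         prev = c
--     return trees
-- ===== Notes on version B (the rewrite author's own statement) =====
-- stated objective: alternative
-- what changed: Replaces A's single pass with a flushed token buffer (recounting all parens of the buffer each line) by a staged pipeline: tokenize nonblank lines, compute per-line paren deltas and their prefix sums, cut the line sequence where the prefix sum is zero, and emit each tree as a flattened slice between consecutive cuts.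
import Mathlib
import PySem

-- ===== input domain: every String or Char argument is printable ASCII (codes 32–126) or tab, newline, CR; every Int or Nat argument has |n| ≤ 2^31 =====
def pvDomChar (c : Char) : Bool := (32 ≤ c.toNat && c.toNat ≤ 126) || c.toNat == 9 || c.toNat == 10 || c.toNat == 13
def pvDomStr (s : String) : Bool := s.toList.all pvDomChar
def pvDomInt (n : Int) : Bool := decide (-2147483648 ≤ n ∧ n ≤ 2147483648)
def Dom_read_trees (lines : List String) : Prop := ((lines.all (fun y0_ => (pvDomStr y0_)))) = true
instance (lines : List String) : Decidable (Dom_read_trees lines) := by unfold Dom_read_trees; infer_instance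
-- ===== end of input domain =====

-- B replaces A's single pass with a flushed token buffer (recounting all parens each
-- line) by a staged computation: tokenized nonblank lines, per-line paren deltas,
-- their prefix sums, cut points where the prefix sum is zero, and trees as flattened
-- slices between cuts (objective: alternative; no token buffer, no recount).

-- ===== PORT A =====
-- line.replace("(", " ( ").replace(")", " ) ").split()   (shared by both ports: the
-- identical expression occurs verbatim in both Pythons)
def pvLineTokens (line : String) : List String :=
  PySem.Str.split₀ (PySem.Str.replace (PySem.Str.replace line "(" " ( ") ")" " ) ")

-- one iteration of A's 'for line in lines' body over the state (trees, tokens)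
def pvStepA (st : List (List String) × List String) (line : String) :
    List (List String) × List String :=
  if PySem.Str.strip line ≠ "" then
    let tokens := st.2 ++ pvLineTokens line
    if PySem.List.count tokens "(" = PySem.List.count tokens ")" then
      (st.1 ++ [tokens], [])
    else (st.1, tokens)
  else st

def read_trees (lines : List String) : List (List String) :=
  (lines.foldl pvStepA ([], [])).1

-- ===== PORT B =====
-- [line.replace(…).replace(…).split() for line in lines if line.strip()]
def pvToklists (lines : List String) : List (List String) :=
  (lines.filter (fun l => PySem.Str.strip l ≠ "")).map pvLineTokens

-- ts.count("(") - ts.count(")")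
def pvDelta (ts : List String) : Int :=
  (PySem.List.count ts "(" : Int) - (PySem.List.count ts ")" : Int)

-- the 's += d; sums.append(s)' loop
def pvSums (deltas : List Int) : List Int :=
  (deltas.foldl (fun (p : List Int × Int) d => (p.1 ++ [p.2 + d], p.2 + d)) ([], 0)).1

-- [i + 1 for i in range(len(toklists)) if sums[i] == 0]   (i ranges over 0..n-1, so
-- Nat indices are exact for Python's nonnegative range values)
def pvCuts (n : Nat) (sums : List Int) : List Nat :=
  ((List.range n).filter (fun (i : Nat) => PySem.List.pyGetD sums (i : Int) 0 = 0)).map (fun i => i + 1)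

-- one iteration of the 'for c in cuts' loop: append the flattened slice toklists[prev:c]
def pvGroupStep (toklists : List (List String)) (st : List (List String) × Nat) (c : Nat) :
    List (List String) × Nat :=
  (st.1 ++ [(PySem.List.slice toklists (some (st.2 : Int)) (some (c : Int))).flatten], c)

def read_trees_alt (lines : List String) : List (List String) :=
  let toklists := pvToklists lines
  let sums := pvSums (toklists.map pvDelta)
  let cuts := pvCuts toklists.length sums
  (cuts.foldl (pvGroupStep toklists) ([], 0)).1

-- ===== PRECONDITION & SPEC =====
def Spec_read_trees (lines : List String) (out : List (List String)) : Prop := out = read_trees_alt lines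
instance (lines : List String) (out : List (List String)) : Decidable (Spec_read_trees lines out) := by unfold Spec_read_trees; infer_instance

-- ===== CLAIM (what is proved, stated in full; the proofs are below) =====
def Claim_equal_read_trees : Prop := ∀ (lines : List String), Dom_read_trees lines → Spec_read_trees lines (read_trees lines)

-- ===== LEMMAS AND PROOFS =====

-- proof-side view of A's step, acting on the filtered token lists
def pvGA (st : List (List String) × List String) (ts : List String) :
    List (List String) × List String :=
  if pvDelta (st.2 ++ ts) = 0 then (st.1 ++ [st.2 ++ ts], []) else (st.1, st.2 ++ ts)

-- proof-side prefix sums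
def pvPsum (s : Int) : List Int → List Int
  | [] => []
  | d :: ds => (s + d) :: pvPsum (s + d) ds

theorem count_cond_iff (b : List String) :
    (PySem.List.count b "(" = PySem.List.count b ")") ↔ pvDelta b = 0 := by
  unfold pvDelta; omega

-- a nonblank line's step in A is pvGA on its tokens
theorem step_eq (st : List (List String) × List String) (l : String)
    (h : PySem.Str.strip l ≠ "") : pvStepA st l = pvGA st (pvLineTokens l) := by
  rw [pvStepA, if_pos h, pvGA]
  by_cases hc : PySem.List.count (st.2 ++ pvLineTokens l) "(" =
      PySem.List.count (st.2 ++ pvLineTokens l) ")"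
  · rw [if_pos hc, if_pos ((count_cond_iff _).mp hc)]
  · rw [if_neg hc, if_neg (fun h0 => hc ((count_cond_iff _).mpr h0))]

-- A's fold over lines equals the pvGA fold over the filtered token lists
theorem foldA_filter (lines : List String) (st : List (List String) × List String) :
    lines.foldl pvStepA st = (pvToklists lines).foldl pvGA st := by
  induction lines generalizing st with
  | nil => rfl
  | cons l rest ih =>
    by_cases h : PySem.Str.strip l ≠ ""
    · rw [pvToklists, List.filter_cons_of_pos (by simpa using h), List.map_cons,
        List.foldl_cons, List.foldl_cons, step_eq st l h]
      exact ih _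
    · rw [pvToklists, List.filter_cons_of_neg (by simpa using h), List.foldl_cons]
      rw [pvStepA, if_neg h]
      exact ih st

-- pvSums is pvPsum
theorem pvSums_aux (ds : List Int) (acc : List Int) (s : Int) :
    (ds.foldl (fun (p : List Int × Int) d => (p.1 ++ [p.2 + d], p.2 + d)) (acc, s)).1
      = acc ++ pvPsum s ds := by
  induction ds generalizing acc s with
  | nil => simp [pvPsum]
  | cons d ds ih => simp [pvPsum, ih]

theorem pvSums_eq (ds : List Int) : pvSums ds = pvPsum 0 ds := by
  simpa using pvSums_aux ds [] 0

-- accumulator lemma for pvGA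
theorem foldGA_acc (L : List (List String)) (tr : List (List String)) (buf : List String) :
    (L.foldl pvGA (tr, buf)).1 = tr ++ (L.foldl pvGA ([], buf)).1 := by
  induction L generalizing tr buf with
  | nil => simp
  | cons ts L ih =>
    simp only [List.foldl_cons, pvGA]
    by_cases h : pvDelta (buf ++ ts) = 0
    · rw [if_pos h, if_pos h]
      rw [ih (tr ++ [buf ++ ts]) [], ih ([] ++ [buf ++ ts]) []]
      simp
    · rw [if_neg h, if_neg h]
      exact ih tr (buf ++ ts)

-- accumulator lemma for pvGroupStep
theorem foldG_acc (M : List (List String)) (cs : List Nat) (tr : List (List String)) (p : Nat) :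
    (cs.foldl (pvGroupStep M) (tr, p)).1 = tr ++ (cs.foldl (pvGroupStep M) ([], p)).1 := by
  induction cs generalizing tr p with
  | nil => simp
  | cons c cs ih =>
    simp only [List.foldl_cons, pvGroupStep]
    rw [ih (tr ++ _) c, ih ([] ++ _) c]
    simp

-- slice with Nat bounds is drop/take
theorem slice_dt (M : List (List String)) (p c : Nat) :
    PySem.List.slice M (some (p : Int)) (some (c : Int)) = (M.drop p).take (c - p) :=
  PySem.List.slice_natCast M p c

-- shift lemma: cuts shifted by one on a list with one extra head
theorem foldG_shift (cs : List Nat) (x : List String) (M : List (List String))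
    (tr : List (List String)) (p : Nat) :
    (cs.map (fun i => i + 1)).foldl (pvGroupStep (x :: M)) (tr, p + 1)
      = ((cs.foldl (pvGroupStep M) (tr, p)).1, (cs.foldl (pvGroupStep M) (tr, p)).2 + 1) := by
  induction cs generalizing tr p with
  | nil => rfl
  | cons c cs ih =>
    simp only [List.map_cons, List.foldl_cons, pvGroupStep, slice_dt]
    rw [show c + 1 - (p + 1) = c - p by omega]
    simp only [List.drop_succ_cons]
    exact ih _ c

theorem foldG_shift_fst (cs : List Nat) (x : List String) (M : List (List String))
    (tr : List (List String)) (p : Nat) :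
    ((cs.map (fun i => i + 1)).foldl (pvGroupStep (x :: M)) (tr, p + 1)).1
      = (cs.foldl (pvGroupStep M) (tr, p)).1 := by
  rw [foldG_shift]

-- congruence: two lists equal from index 1 on give the same groups fold when
-- the running start index and every cut are ≥ 1
theorem foldG_congr (cs : List Nat) (L₁ L₂ : List (List String))
    (hdrop : ∀ q : Nat, 1 ≤ q → L₁.drop q = L₂.drop q)
    (tr : List (List String)) (p : Nat) (hp : 1 ≤ p)
    (hcs : ∀ c ∈ cs, 1 ≤ c) :
    cs.foldl (pvGroupStep L₁) (tr, p) = cs.foldl (pvGroupStep L₂) (tr, p) := by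
  induction cs generalizing tr p with
  | nil => rfl
  | cons c cs ih =>
    simp only [List.foldl_cons, pvGroupStep, slice_dt, hdrop p hp]
    exact ih _ c (hcs c (List.mem_cons_self ..)) (fun e he => hcs e (List.mem_cons_of_mem _ he))

-- every cut is ≥ 1
theorem cuts_ge_one (n : Nat) (s : List Int) : ∀ c ∈ pvCuts n s, 1 ≤ c := by
  intro c hc
  simp only [pvCuts, List.mem_map] at hc
  obtain ⟨i, -, rfl⟩ := hc
  omega

-- unfolding of pvCuts on a cons of sums
theorem pvCuts_succ (n : Nat) (s0 : Int) (s' : List Int) :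
    pvCuts (n + 1) (s0 :: s')
      = (if s0 = 0 then [1] else []) ++ (pvCuts n s').map (fun i => i + 1) := by
  simp only [pvCuts, List.range_succ_eq_map, List.filter_cons]
  rw [List.filter_map]
  have hp : ((fun (i : Nat) => decide (PySem.List.pyGetD (s0 :: s') (i : Int) 0 = 0)) ∘ Nat.succ)
      = fun (i : Nat) => decide (PySem.List.pyGetD s' (i : Int) 0 = 0) := by
    funext i
    simp [PySem.List.pyGetD_natCast]
  rw [hp]
  by_cases h : s0 = 0 <;>
    simp [h, PySem.List.pyGetD_natCast, List.map_map, Function.comp_def, Nat.succ_eq_add_one]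

-- pvDelta is additive over append
theorem pvDelta_append (a b : List String) : pvDelta (a ++ b) = pvDelta a + pvDelta b := by
  simp only [pvDelta, PySem.List.count, List.count_append]
  push_cast; ring

-- the core result, by strong induction on the length of the token-list list
theorem core (n : Nat) : ∀ L : List (List String), L.length = n →
    (L.foldl pvGA ([], [])).1
      = ((pvCuts L.length (pvPsum 0 (L.map pvDelta))).foldl (pvGroupStep L) ([], 0)).1 := by
  induction n using Nat.strong_induction_on with
  | _ n ih =>
    intro L hL
    match L, n, hL with
    | [], _, rfl => rfl
    | ts :: rest, _, rfl =>
      by_cases h0 : pvDelta ts = 0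
      · -- head is balanced: it is flushed as a tree on both sides
        have hstep : pvGA ([], []) ts = ([ts], []) := by
          simp [pvGA, h0]
        rw [List.foldl_cons, hstep, foldGA_acc]
        simp only [List.map_cons]
        have hsums : pvPsum 0 (pvDelta ts :: rest.map pvDelta)
            = 0 :: pvPsum 0 (rest.map pvDelta) := by
          simp [pvPsum, h0]
        rw [hsums, show (ts :: rest).length = rest.length + 1 from rfl, pvCuts_succ, if_pos rfl]
        simp only [List.cons_append, List.nil_append, List.foldl_cons, pvGroupStep, slice_dt]
        simp only [Nat.sub_zero, List.drop_zero, List.take_succ_cons, List.take_zero,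
          List.flatten_cons, List.flatten_nil, List.append_nil]
        rw [foldG_shift_fst, foldG_acc]
        rw [ih rest.length (by simp only [List.length_cons]; omega) rest rfl]
        rfl
      · match rest with
        | [] =>
          -- single unbalanced line: no tree on either side
          have hstep : pvGA ([], []) ts = ([], ts) := by simp [pvGA, h0]
          rw [List.foldl_cons, hstep]
          have hcuts : pvCuts [ts].length (pvPsum 0 ([ts].map pvDelta)) = [] := by
            simp [pvCuts, pvPsum, List.range_succ, PySem.List.pyGetD_natCast, zero_add, h0]
          rw [hcuts]
          rfl
        | ts' :: rest' =>
          -- merge the two head lines: A's buffer makes this literal, B's cuts shift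
          have hA : ((ts :: ts' :: rest').foldl pvGA ([], [])).1
              = (((ts ++ ts') :: rest').foldl pvGA ([], [])).1 := by
            simp only [List.foldl_cons]
            congr 2
            simp [pvGA, h0, pvDelta_append]
          rw [hA, ih (rest'.length + 1) (by simp only [List.length_cons]; omega)
            ((ts ++ ts') :: rest') (by simp)]
          simp only [List.map_cons]
          have hsums : pvPsum 0 (pvDelta ts :: pvDelta ts' :: rest'.map pvDelta)
              = pvDelta ts :: pvPsum 0 (pvDelta (ts ++ ts') :: rest'.map pvDelta) := by
            simp [pvPsum, pvDelta_append]
          rw [hsums, show (ts :: ts' :: rest').length = ((ts ++ ts') :: rest').length + 1 by simp,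
            pvCuts_succ, if_neg h0, List.nil_append]
          set cm := pvCuts ((ts ++ ts') :: rest').length
            (pvPsum 0 (pvDelta (ts ++ ts') :: rest'.map pvDelta)) with hcm
          have hge : ∀ c ∈ cm, 1 ≤ c := hcm ▸ cuts_ge_one _ _
          symm
          match hc : cm with
          | [] => rfl
          | c :: cs =>
            obtain ⟨c', rfl⟩ : ∃ c', c = c' + 1 := by
              have := hge c (List.mem_cons_self ..)
              exact ⟨c - 1, by omega⟩
            simp only [List.map_cons, List.foldl_cons, pvGroupStep, slice_dt]
            have hfl : (((ts :: ts' :: rest').drop 0).take (c' + 1 + 1 - 0)).flatten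
                = ((((ts ++ ts') :: rest').drop 0).take (c' + 1 - 0)).flatten := by
              simp [List.take_succ_cons, List.flatten_cons, List.append_assoc]
            rw [hfl, foldG_shift_fst]
            apply congrArg Prod.fst
            apply foldG_congr
            · intro q hq
              obtain ⟨q', rfl⟩ : ∃ q', q = q' + 1 := ⟨q - 1, by omega⟩
              simp [List.drop_succ_cons]
            · omega
            · intro e he
              exact hge e (List.mem_cons_of_mem _ he)

-- read_trees_alt, with its lets spelled out
theorem alt_eq (lines : List String) :
    read_trees_alt lines
      = ((pvCuts (pvToklists lines).length (pvSums ((pvToklists lines).map pvDelta))).foldl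
          (pvGroupStep (pvToklists lines)) ([], 0)).1 := rfl

-- ===== VERDICT (by name: the statement is the Claim_ definition above) =====
theorem read_trees_spec : Claim_equal_read_trees := by
  intro lines _
  unfold Spec_read_trees read_trees
  rw [alt_eq, pvSums_eq, foldA_filter]
  exact core (pvToklists lines).length (pvToklists lines) rfl
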